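-- pv_equiv track=rewrite | github.com/phanductaivt/2B-Agents | system/tools/context/context_sync.py | _workflow_playbook_section
-- ===== SOURCE A (Python) =====
-- def _workflow_playbook_section(catalog: list[dict[str, object]]) -> str:
--     stages: dict[str, list[str]] = {}
--     for item in catalog:
--         stage = str(item.get("stage", "")).strip() or "unknown"
--         stages.setdefault(stage, []).append(str(item.get("name", "")).strip())
--
--     lines = [
--         "## Level 1 Auto-Synced Playbook View",
--         "",
--         "### High-Level Project Flow",
--         "1. Read requirement input from `projects/<project-name>/01-input/requirements/`.",
--         "2. Run BA artifacts.",
--         "3. Run UXUI artifact (`wireframe`).",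
--         "4. Run FE artifact (`ui`).",
--         "5. Run review/quality artifacts.",
--         "6. Write outputs to `projects/<project-name>/_ops/generated/<requirement-name>/` and curated copies in `02-output/`.",
--         "7. Update project status and dashboards.",
--         "",
--         "### Stage Flow (from artifact catalog)",
--     ]
--     for stage_name, artifacts in stages.items():
--         lines.append(f"- `{stage_name}`: {', '.join([a for a in artifacts if a])}")
--
--     lines.extend(
--         [
--             "",
--             "### Artifact Execution Logic",
--             "- Full run mode uses dependency order.",
--             "- Controlled run mode supports `--artifact` and `--stage`.",
--             "- Existing outputs can be skipped unless `--force` is used.",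
--             "",
--             "### Gate-Aware Flow",
--             "- Before each artifact, dependency gate and approval are checked.",
--             "- If not allowed, artifact is marked blocked/not allowed.",
--             "- Optional `--override-gate` allows manual continuation with notes.",
--             "",
--             "<!-- TODO: Add a compact visual snippet linking stages to gate checkpoints. -->",
--         ]
--     )
--     return "\n".join(lines)
-- ===== SOURCE B (Python) =====
-- def _workflow_playbook_section(catalog: list[dict[str, object]]) -> str:
--     def stage(item):
--         return str(item.get("stage", "")).strip() or "unknown"
--
--     def name(item):
--         return str(item.get("name", "")).strip()
--
--     def emit(rest):
--         # recursive partition grouping: take the first item's stage, emit its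
--         # line from all matching items, recurse on the remaining stages
--         if not rest:
--             return []
--         st = stage(rest[0])
--         names = [name(i) for i in rest if stage(i) == st and name(i)]
--         line = "- `{}`: {}".format(st, ", ".join(names))
--         return [line] + emit([i for i in rest if stage(i) != st])
--
--     header = [
--         "## Level 1 Auto-Synced Playbook View",
--         "",
--         "### High-Level Project Flow",
--         "1. Read requirement input from `projects/<project-name>/01-input/requirements/`.",
--         "2. Run BA artifacts.",
--         "3. Run UXUI artifact (`wireframe`).",
--         "4. Run FE artifact (`ui`).",
--         "5. Run review/quality artifacts.",
--         "6. Write outputs to `projects/<project-name>/_ops/generated/<requirement-name>/` and curated copies in `02-output/`.",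
--         "7. Update project status and dashboards.",
--         "",
--         "### Stage Flow (from artifact catalog)",
--     ]
--     trailer = [
--         "",
--         "### Artifact Execution Logic",
--         "- Full run mode uses dependency order.",
--         "- Controlled run mode supports `--artifact` and `--stage`.",
--         "- Existing outputs can be skipped unless `--force` is used.",
--         "",
--         "### Gate-Aware Flow",
--         "- Before each artifact, dependency gate and approval are checked.",
--         "- If not allowed, artifact is marked blocked/not allowed.",
--         "- Optional `--override-gate` allows manual continuation with notes.",
--         "",
--         "<!-- TODO: Add a compact visual snippet linking stages to gate checkpoints. -->",
--     ]
--     return "\n".join(header + emit(catalog) + trailer)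
-- ===== Notes on version B (the rewrite author's own statement) =====
-- stated objective: alternative
-- what changed: A groups names into an insertion-ordered dict keyed by normalized stage in one pass and then emits its items; B uses no dict at all: it recursively partitions the catalog, emitting the first remaining item's stage line from all items of that stage and recursing on the items of other stages.
import Mathlib
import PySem

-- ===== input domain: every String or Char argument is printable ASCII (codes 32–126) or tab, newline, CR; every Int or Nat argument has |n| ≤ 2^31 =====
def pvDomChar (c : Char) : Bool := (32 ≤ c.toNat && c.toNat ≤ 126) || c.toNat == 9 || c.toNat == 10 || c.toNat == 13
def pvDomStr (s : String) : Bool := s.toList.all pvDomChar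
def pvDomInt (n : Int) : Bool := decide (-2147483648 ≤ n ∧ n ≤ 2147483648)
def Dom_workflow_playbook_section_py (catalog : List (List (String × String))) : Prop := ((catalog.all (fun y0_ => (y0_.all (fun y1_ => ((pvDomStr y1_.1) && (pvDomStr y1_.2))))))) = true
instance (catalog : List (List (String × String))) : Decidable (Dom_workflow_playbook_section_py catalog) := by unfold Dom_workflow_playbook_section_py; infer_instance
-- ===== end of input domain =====

-- B replaces A's one-pass dict grouping by a recursive partition: emit the first remaining
-- item's stage line from all items of that stage, recurse on the rest; objective: alternative
-- decomposition, same output.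

-- static markdown lines shared by both ports (pure string constants)
def pvHeaderLines : List String :=
  [ "## Level 1 Auto-Synced Playbook View",
    "",
    "### High-Level Project Flow",
    "1. Read requirement input from `projects/<project-name>/01-input/requirements/`.",
    "2. Run BA artifacts.",
    "3. Run UXUI artifact (`wireframe`).",
    "4. Run FE artifact (`ui`).",
    "5. Run review/quality artifacts.",
    "6. Write outputs to `projects/<project-name>/_ops/generated/<requirement-name>/` and curated copies in `02-output/`.",
    "7. Update project status and dashboards.",
    "",
    "### Stage Flow (from artifact catalog)" ]

def pvTrailerLines : List String :=
  [ "",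
    "### Artifact Execution Logic",
    "- Full run mode uses dependency order.",
    "- Controlled run mode supports `--artifact` and `--stage`.",
    "- Existing outputs can be skipped unless `--force` is used.",
    "",
    "### Gate-Aware Flow",
    "- Before each artifact, dependency gate and approval are checked.",
    "- If not allowed, artifact is marked blocked/not allowed.",
    "- Optional `--override-gate` allows manual continuation with notes.",
    "",
    "<!-- TODO: Add a compact visual snippet linking stages to gate checkpoints. -->" ]

-- ===== PORT A =====
-- str(item.get("stage", "")).strip() or "unknown"   (values are strings, str() is identity)
def pvStageA (item : List (String × String)) : String :=
  let s := PySem.Str.strip ((PySem.Dict.mk item).getD "stage" "")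
  if s = "" then "unknown" else s

-- str(item.get("name", "")).strip()
def pvNameA (item : List (String × String)) : String :=
  PySem.Str.strip ((PySem.Dict.mk item).getD "name" "")

-- stages.setdefault(stage, []).append(name)  ≡  stages[stage] = stages.get(stage, []) + [name]
def workflow_playbook_section_py (catalog : List (List (String × String))) : String :=
  let stages : PySem.Dict String (List String) :=
    catalog.foldl
      (fun d item => d.modify (pvStageA item) [] (fun v => v ++ [pvNameA item]))
      PySem.Dict.empty
  let lines := pvHeaderLines ++
    stages.items.map (fun p =>
      "- `" ++ p.1 ++ "`: " ++ PySem.Str.join ", " (p.2.filter (fun a => a ≠ ""))) ++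
    pvTrailerLines
  PySem.Str.join "\n" lines

-- ===== PORT B =====
def pvStageB (item : List (String × String)) : String :=
  let s := PySem.Str.strip ((PySem.Dict.mk item).getD "stage" "")
  if s = "" then "unknown" else s

def pvNameB (item : List (String × String)) : String :=
  PySem.Str.strip ((PySem.Dict.mk item).getD "name" "")

-- `name(i) for i in rest if stage(i) == st and name(i)` for one stage st
def pvMatchB (st : String) (item : List (String × String)) : Option String :=
  if pvStageB item = st ∧ pvNameB item ≠ "" then some (pvNameB item) else none

-- recursive partition grouping: the first item's stage is emitted from all its items,
-- then recurse on the items of the other stages (Python's `emit`)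
def pvEmitB : List (List (String × String)) → List String
  | [] => []
  | x :: xs =>
      ("- `" ++ pvStageB x ++ "`: " ++
        PySem.Str.join ", " ((x :: xs).filterMap (pvMatchB (pvStageB x))))
        :: pvEmitB (xs.filter (fun i => pvStageB i ≠ pvStageB x))
  termination_by l => l.length
  decreasing_by
    simp only [List.length_cons, Nat.lt_succ_iff, List.length_unattach]
    exact (List.length_filter_le _ _).trans (le_of_eq List.length_attach)

def workflow_playbook_section_py_alt (catalog : List (List (String × String))) : String :=
  PySem.Str.join "\n" (pvHeaderLines ++ pvEmitB catalog ++ pvTrailerLines)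

-- ===== PRECONDITION & SPEC =====
def Spec_workflow_playbook_section_py (catalog : List (List (String × String))) (out : String) : Prop := out = workflow_playbook_section_py_alt catalog
instance (catalog : List (List (String × String))) (out : String) : Decidable (Spec_workflow_playbook_section_py catalog out) := by unfold Spec_workflow_playbook_section_py; infer_instance

-- ===== CLAIM (what is proved, stated in full; the proofs are below) =====
def Claim_equal_workflow_playbook_section_py : Prop := ∀ (catalog : List (List (String × String))), Dom_workflow_playbook_section_py catalog → Spec_workflow_playbook_section_py catalog (workflow_playbook_section_py catalog)

-- ===== LEMMAS AND PROOFS =====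

theorem pvStageB_eq (item : List (String × String)) : pvStageB item = pvStageA item := rfl
theorem pvNameB_eq (item : List (String × String)) : pvNameB item = pvNameA item := rfl

theorem pvEmitB_cons (x : List (String × String)) (xs : List (List (String × String))) :
    pvEmitB (x :: xs)
      = ("- `" ++ pvStageB x ++ "`: " ++
          PySem.Str.join ", " ((x :: xs).filterMap (pvMatchB (pvStageB x))))
        :: pvEmitB (xs.filter (fun i => pvStageB i ≠ pvStageB x)) := by
  rw [pvEmitB.eq_def]

-- first-seen-order deduplication, in the same recursion shape as pvEmitB
def pvDedup : List String → List String
  | [] => []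
  | k :: ks => k :: pvDedup (ks.filter (fun x => x ≠ k))
  termination_by l => l.length
  decreasing_by
    simp only [List.length_cons, Nat.lt_succ_iff, List.length_unattach]
    exact (List.length_filter_le _ _).trans (le_of_eq List.length_attach)

theorem pvDedup_cons (k : String) (ks : List String) :
    pvDedup (k :: ks) = k :: pvDedup (ks.filter (fun x => x ≠ k)) := by
  rw [pvDedup.eq_def]

-- the stage line B emits for key k from list l
def pvLine (l : List (List (String × String))) (k : String) : String :=
  "- `" ++ k ++ "`: " ++ PySem.Str.join ", " (l.filterMap (pvMatchB k))

theorem mem_pvDedup_aux (k : String) : ∀ (n : Nat) (l : List String), l.length ≤ n →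
    k ∈ pvDedup l → k ∈ l := by
  intro n
  induction n with
  | zero =>
    intro l hl
    rw [List.length_eq_zero_iff.mp (Nat.le_zero.mp hl)]
    simp [pvDedup.eq_def]
  | succ m ih =>
    intro l hl
    match l with
    | [] => simp [pvDedup.eq_def]
    | x :: xs =>
      rw [pvDedup_cons]
      simp only [List.mem_cons]
      rintro (h | h)
      · exact Or.inl h
      · refine Or.inr (List.mem_of_mem_filter (ih _ ?_ h))
        exact (List.length_filter_le _ _).trans (Nat.le_of_succ_le_succ hl)

theorem mem_pvDedup (k : String) (l : List String) (h : k ∈ pvDedup l) : k ∈ l :=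
  mem_pvDedup_aux k l.length l (Nat.le_refl _) h

-- matching items of stage k survive filtering away another stage st
theorem pv_filterMap_filter (k st : String) (h : k ≠ st) (l : List (List (String × String))) :
    (l.filter (fun i => pvStageB i ≠ st)).filterMap (pvMatchB k) = l.filterMap (pvMatchB k) := by
  induction l with
  | nil => rfl
  | cons i xs ih =>
    rw [List.filter_cons]
    by_cases hs : pvStageB i = st
    · have hnone : pvMatchB k i = none := by
        unfold pvMatchB
        rw [if_neg]
        rintro ⟨h1, -⟩
        exact h (h1 ▸ hs)
      simp only [ne_eq, decide_not] at ih
      simp [hs, hnone, ih]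
    · simp only [ne_eq, decide_not] at ih
      simp [hs, List.filterMap_cons, ih]

-- B's recursion computes: distinct stages in first-seen order, each rendered from the full list
theorem pvEmitB_spec_aux : ∀ (n : Nat) (l : List (List (String × String))), l.length ≤ n →
    pvEmitB l = (pvDedup (l.map pvStageB)).map (pvLine l) := by
  intro n
  induction n with
  | zero =>
    intro l hl
    rw [List.length_eq_zero_iff.mp (Nat.le_zero.mp hl)]
    simp [pvEmitB.eq_def, pvDedup.eq_def]
  | succ m ih =>
    intro l hl
    match l with
    | [] => simp [pvEmitB.eq_def, pvDedup.eq_def]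
    | x :: xs =>
      rw [pvEmitB_cons, List.map_cons, pvDedup_cons, List.map_cons]
      have hmf : (xs.map pvStageB).filter (fun s => s ≠ pvStageB x)
          = (xs.filter (fun i => pvStageB i ≠ pvStageB x)).map pvStageB := by
        rw [List.filter_map]
        rfl
      rw [hmf, ih (xs.filter (fun i => pvStageB i ≠ pvStageB x))
        ((List.length_filter_le _ _).trans (Nat.le_of_succ_le_succ hl))]
      refine congrArg₂ List.cons rfl ?_
      apply List.map_congr_left
      intro kk hk
      have hk' : kk ≠ pvStageB x := by
        have h1 := mem_pvDedup kk _ hk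
        rw [← hmf] at h1
        have h2 := List.of_mem_filter h1
        simpa using h2
      unfold pvLine
      rw [pv_filterMap_filter kk (pvStageB x) hk' xs]
      have hx : pvMatchB kk x = none := by
        unfold pvMatchB
        rw [if_neg]
        rintro ⟨h1, -⟩
        exact hk' h1.symm
      rw [List.filterMap_cons, hx]

theorem pvEmitB_spec (l : List (List (String × String))) :
    pvEmitB l = (pvDedup (l.map pvStageB)).map (pvLine l) :=
  pvEmitB_spec_aux l.length l (Nat.le_refl _)

-- A's first-seen fold equals pvDedup
theorem pv_foldl_dedup : ∀ (l : List String) (acc : List String),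
    l.foldl (fun a k => if k ∈ a then a else a ++ [k]) acc
      = acc ++ pvDedup (l.filter (fun k => k ∉ acc)) := by
  intro l
  induction l with
  | nil => intro acc; simp [pvDedup.eq_def]
  | cons k ks ih =>
    intro acc
    simp only [List.foldl_cons, List.filter_cons]
    by_cases h : k ∈ acc
    · rw [if_pos h, ih]
      simp [h]
    · rw [if_neg h, ih]
      have hd : decide (k ∉ acc) = true := by simpa using h
      rw [hd]
      simp only [if_pos]
      rw [pvDedup_cons]
      have hff : ks.filter (fun x => x ∉ acc ++ [k])
          = (ks.filter (fun x => x ∉ acc)).filter (fun x => x ≠ k) := by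
        rw [List.filter_filter]
        apply List.filter_congr
        intro x _
        simp [List.mem_append, not_or, and_comm]
      rw [← hff, List.append_assoc]
      rfl

-- A's grouping fold: value at each key
theorem pv_getD_fold (l : List (List (String × String)))
    (d : PySem.Dict String (List String)) (k : String) :
    (l.foldl (fun d item => d.modify (pvStageA item) [] (fun v => v ++ [pvNameA item])) d).getD k []
      = d.getD k [] ++ (l.filter (fun i => pvStageA i = k)).map pvNameA := by
  induction l generalizing d with
  | nil => simp
  | cons x xs ih =>
    simp only [List.foldl_cons, ih, List.filter_cons]
    rw [PySem.Dict.getD_modify]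
    by_cases h : pvStageA x = k
    · simp [h]
    · simp [h, Ne.symm h]

-- A's grouping fold: keys = distinct stages in first-seen order
theorem pv_keys_fold (l : List (List (String × String)))
    (d : PySem.Dict String (List String)) :
    (l.foldl (fun d item => d.modify (pvStageA item) [] (fun v => v ++ [pvNameA item])) d).keys
      = (l.map pvStageA).foldl (fun a k => if k ∈ a then a else a ++ [k]) d.keys := by
  induction l generalizing d with
  | nil => rfl
  | cons x xs ih =>
    simp only [List.foldl_cons, List.map_cons, ih]
    congr 1
    rw [PySem.Dict.keys_modify]
    by_cases h : pvStageA x ∈ d.keys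
    · rw [if_pos h, PySem.Dict.keys_insert_of_contains _ _ ((PySem.Dict.contains_iff_mem_keys d _).mpr h)]
    · rw [if_neg h, PySem.Dict.keys_insert_of_not_contains _ _ (by
        rw [Bool.eq_false_iff]; intro hc; exact h ((PySem.Dict.contains_iff_mem_keys d _).mp hc))]

theorem pv_nodup_keys (l : List (List (String × String))) :
    (l.foldl (fun d item => d.modify (pvStageA item) [] (fun v => v ++ [pvNameA item]))
      (PySem.Dict.empty : PySem.Dict String (List String))).keys.Nodup := by
  exact PySem.Dict.nodup_keys_foldl_modify_key l pvStageA [] (fun d i => fun v => v ++ [pvNameA i])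
    PySem.Dict.empty (by simp)

-- A's per-key line content equals B's single filterMap scan
theorem pv_line_content (l : List (List (String × String))) (k : String) :
    ((l.filter (fun i => pvStageA i = k)).map pvNameA).filter (fun a => a ≠ "")
      = l.filterMap (pvMatchB k) := by
  induction l with
  | nil => simp
  | cons x xs ih =>
    simp only [List.filter_cons, List.filterMap_cons, pvMatchB, pvStageB_eq, pvNameB_eq]
    by_cases hs : pvStageA x = k
    · by_cases hn : pvNameA x = ""
      · simpa [hs, hn, pvMatchB] using ih
      · simpa [hs, hn, pvMatchB] using ih
    · simpa [hs, pvMatchB] using ih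

-- the middle section: A's dict emission equals B's recursive emission
theorem pv_main (catalog : List (List (String × String))) :
    ((catalog.foldl
        (fun d item => d.modify (pvStageA item) [] (fun v => v ++ [pvNameA item]))
        (PySem.Dict.empty : PySem.Dict String (List String))).items).map
      (fun p => "- `" ++ p.1 ++ "`: " ++ PySem.Str.join ", " (p.2.filter (fun a => a ≠ "")))
      = pvEmitB catalog := by
  rw [pvEmitB_spec]
  rw [PySem.Dict.items_eq_map_keys _ (pv_nodup_keys catalog) []]
  rw [List.map_map, pv_keys_fold]
  simp only [PySem.Dict.keys_empty]
  rw [pv_foldl_dedup]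
  simp only [List.nil_append, List.not_mem_nil, not_false_iff, decide_true, List.filter_true]
  have hmap : catalog.map pvStageA = catalog.map pvStageB := rfl
  rw [hmap]
  apply List.map_congr_left
  intro k _
  simp only [Function.comp]
  rw [pv_getD_fold, PySem.Dict.getD_empty, List.nil_append, pv_line_content]
  rfl

-- ===== VERDICT (by name: the statement is the Claim_ definition above) =====
theorem workflow_playbook_section_py_spec : Claim_equal_workflow_playbook_section_py := by
  intro catalog _
  unfold Spec_workflow_playbook_section_py workflow_playbook_section_py workflow_playbook_section_py_alt
  simp only [pv_main]
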